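-- pv_equiv track=rewrite | github.com/kkr010128/codebert | problem132/problem132_42.py | count_num_light
-- ===== SOURCE A (Python) =====
-- def count_num_light(a):
--   ret = [0 for _ in range(len(a))]
--   n = len(a)
--   for i in range(n):
--     start = max(0, i-a[i])
--     end = min(n-1, i+a[i])
--     ret[start] += 1
--     if end+1 < n:
--       ret[end+1] -= 1
--   for i in range(1,n):
--     ret[i] += ret[i-1]
--
--   return ret
-- ===== SOURCE B (Python) =====
-- def count_num_light(a):
--   n = len(a)
--   ret = [0] * n
--   for i in range(n):
--     start = max(0, i - a[i])
--     end = min(n - 1, i + a[i])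
--     for j in range(start, end + 1):
--       ret[j] += 1
--   return ret
-- ===== Notes on version B (the rewrite author's own statement) =====
-- stated objective: alternative
-- what changed: B paints each covered cell directly with an inner range loop (ret[j] += 1 for every j in [start, end]) instead of A's difference-array edge updates followed by a prefix-sum integration pass.
-- outside the precondition, e.g. on count_num_light([-1, 0]): A returns [-1, 1], B returns [0, 1]; on count_num_light([0, -1, 0, 0]): A returns [1, -1, 1, 1], B returns [1, 0, 1, 1]
import Mathlib
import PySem

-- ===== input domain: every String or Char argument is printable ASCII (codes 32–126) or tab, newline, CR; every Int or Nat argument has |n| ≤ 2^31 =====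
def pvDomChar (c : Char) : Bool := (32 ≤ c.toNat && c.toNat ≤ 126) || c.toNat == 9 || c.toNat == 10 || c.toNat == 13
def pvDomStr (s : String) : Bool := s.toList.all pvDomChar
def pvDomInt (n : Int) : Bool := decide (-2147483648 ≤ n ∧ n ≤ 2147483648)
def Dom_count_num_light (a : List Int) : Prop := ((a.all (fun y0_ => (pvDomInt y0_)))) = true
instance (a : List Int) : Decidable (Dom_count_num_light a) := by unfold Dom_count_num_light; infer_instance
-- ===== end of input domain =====

-- B replaces A's difference-array edge updates + prefix-sum pass by directly painting every covered cell (objective: alternative algorithm).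

-- ===== PORT A =====
-- body of A's first loop: ret[start] += 1; if end+1 < n: ret[end+1] -= 1
-- (pySetD is exact here: under Pre_ every written index is in range; where Python would raise
--  IndexError or wrap a negative index the input is outside Pre_)
def pvStepA (a : List Int) (ret : List Int) (i : Int) : List Int :=
  let n : Int := a.length
  let ai := PySem.List.pyGetD a i 0
  let s := max 0 (i - ai)
  let e := min (n - 1) (i + ai)
  let ret1 := PySem.List.pySetD ret s (PySem.List.pyGetD ret s 0 + 1)
  if e + 1 < n then PySem.List.pySetD ret1 (e + 1) (PySem.List.pyGetD ret1 (e + 1) 0 - 1) else ret1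

-- body of A's second loop: ret[i] += ret[i-1]
def pvPrefixStep (ret : List Int) (i : Int) : List Int :=
  PySem.List.pySetD ret i (PySem.List.pyGetD ret i 0 + PySem.List.pyGetD ret (i - 1) 0)

def count_num_light (a : List Int) : List Int :=
  let n : Int := a.length
  let ret : List Int := List.replicate a.length 0
  let ret := (PySem.List.pyRange 0 n 1).foldl (pvStepA a) ret
  (PySem.List.pyRange 1 n 1).foldl pvPrefixStep ret

-- ===== PORT B =====
-- body of B's inner loop: ret[j] += 1
def pvPaintStep (r : List Int) (j : Int) : List Int :=
  PySem.List.pySetD r j (PySem.List.pyGetD r j 0 + 1)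

-- body of B's outer loop: for j in range(start, end+1): ret[j] += 1
def pvStepB (a : List Int) (ret : List Int) (i : Int) : List Int :=
  let n : Int := a.length
  let ai := PySem.List.pyGetD a i 0
  let s := max 0 (i - ai)
  let e := min (n - 1) (i + ai)
  (PySem.List.pyRange s (e + 1) 1).foldl pvPaintStep ret

def count_num_light_alt (a : List Int) : List Int :=
  let n : Int := a.length
  (PySem.List.pyRange 0 n 1).foldl (pvStepB a) (List.replicate a.length 0)

-- ===== PRECONDITION & SPEC =====
-- Pre_ excludes lists containing a negative radius — malformed input outside the function's
-- natural domain, on which A raises IndexError or returns accidental negative counts from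
-- wrapped difference-array updates.
def Pre_count_num_light (a : List Int) : Prop := ∀ x ∈ a, 0 ≤ x
instance (a : List Int) : Decidable (Pre_count_num_light a) := by unfold Pre_count_num_light; infer_instance

def pvWitness_count_num_light : List Int := [2, 0, 1]

def Spec_count_num_light (a : List Int) (out : List Int) : Prop := out = count_num_light_alt a
instance (a : List Int) (out : List Int) : Decidable (Spec_count_num_light a out) := by unfold Spec_count_num_light; infer_instance

-- ===== CLAIM (what is proved, stated in full; the proofs are below) =====
def Claim_equal_count_num_light : Prop := ∀ (a : List Int), Dom_count_num_light a → Pre_count_num_light a → Spec_count_num_light a (count_num_light a)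

-- ===== LEMMAS AND PROOFS =====

theorem pvLenSetD (ret : List Int) (p v : Int) :
    (PySem.List.pySetD ret p v).length = ret.length := by
  simp [PySem.List.length_pySetD]

theorem pvSumSet (l : List Int) (p : Nat) (hp : p < l.length) (v : Int) :
    (l.set p v).sum = l.sum + v - l.getD p 0 := by
  induction l generalizing p with
  | nil => simp at hp
  | cons x xs ih =>
    cases p with
    | zero => simp [List.set]; ring
    | succ q =>
      simp only [List.set, List.sum_cons, List.getD_cons_succ]
      rw [ih q (by simpa using hp)]
      ring

theorem pvSumTakeSet (l : List Int) (p : Nat) (hp : p < l.length) (d : Int) (t : Nat) :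
    ((l.set p (l.getD p 0 + d)).take t).sum = (l.take t).sum + (if p < t then d else 0) := by
  rw [List.take_set]
  by_cases h : p < t
  · have hp' : p < (l.take t).length := by simp [List.length_take]; omega
    rw [pvSumSet _ p hp' _]
    have hgd : (l.take t).getD p 0 = l.getD p 0 := by
      simp only [List.getD_eq_getElem?_getD]
      rw [List.getElem?_take_of_lt h]
    rw [hgd]; simp [h]; ring
  · have hset : (l.take t).set p (l.getD p 0 + d) = l.take t := by
      apply List.set_eq_of_length_le
      simp [List.length_take]; omega
    rw [hset]; simp [h]

theorem pvGetDSet (l : List Int) (p : Nat) (hp : p < l.length) (v : Int) (k : Nat) :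
    (l.set p v).getD k 0 = if k = p then v else l.getD k 0 := by
  by_cases h : k = p
  · subst h
    simp [List.getD_eq_getElem?_getD, hp]
  · simp only [List.getD_eq_getElem?_getD, h, if_false]
    rw [List.getElem?_set_ne (by omega)]

-- pySetD as "add d at nonnegative in-range index": effect on prefix sums and on entries
theorem pvSumTakeSetD (ret : List Int) (p : Int) (hp0 : 0 ≤ p) (hp : p < (ret.length : Int)) (d : Int) (t : Nat) :
    ((PySem.List.pySetD ret p (PySem.List.pyGetD ret p 0 + d)).take t).sum
      = (ret.take t).sum + (if p < (t : Int) then d else 0) := by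
  rw [PySem.List.pySetD_of_nonneg ret _ hp0, PySem.List.pyGetD_of_nonneg ret _ hp0]
  rw [pvSumTakeSet ret p.toNat (by omega) d t]
  congr 1
  by_cases h : p.toNat < t
  · rw [if_pos h, if_pos (by omega)]
  · rw [if_neg h, if_neg (by omega)]

theorem pvGetDSetD (ret : List Int) (p : Int) (hp0 : 0 ≤ p) (hp : p < (ret.length : Int)) (v : Int) (k : Nat) :
    (PySem.List.pySetD ret p v).getD k 0 = if (k : Int) = p then v else ret.getD k 0 := by
  rw [PySem.List.pySetD_of_nonneg ret _ hp0]
  rw [pvGetDSet ret p.toNat (by omega) v k]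
  by_cases h : k = p.toNat
  · rw [if_pos h, if_pos (by omega)]
  · rw [if_neg h, if_neg (by omega)]

-- effect of A's loop body on prefix sums: processing light m adds 1 to every prefix
-- sum that covers an index in [start, end]
theorem pvStepA_length (a ret : List Int) (i : Int) : (pvStepA a ret i).length = ret.length := by
  simp only [pvStepA]
  split <;> simp

theorem pvStepA_sumTake (a ret : List Int) (hlen : ret.length = a.length) (m : Nat) (hm : m < a.length)
    (hai : 0 ≤ a.getD m 0) (k : Nat) (hk : k < a.length) :
    ((pvStepA a ret (m : Int)).take (k + 1)).sum
      = (ret.take (k + 1)).sum +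
        (if max 0 ((m : Int) - a.getD m 0) ≤ (k : Int) ∧ (k : Int) ≤ min ((a.length : Int) - 1) ((m : Int) + a.getD m 0) then 1 else 0) := by
  simp only [pvStepA, PySem.List.pyGetD_natCast]
  set ai := a.getD m 0 with hai_def
  set s := max 0 ((m : Int) - ai) with hs
  set e := min ((a.length : Int) - 1) ((m : Int) + ai) with he
  have hs0 : 0 ≤ s := le_max_left _ _
  have hsn : s < (ret.length : Int) := by rw [hlen]; simp only [hs]; omega
  have hse : s ≤ e := by simp only [hs, he]; omega
  have hkc : ((k + 1 : Nat) : Int) = (k : Int) + 1 := by push_cast; ring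
  split
  · rename_i hguard
    have he0 : (0:Int) ≤ e + 1 := by simp only [he]; omega
    have hen : e + 1 < ((PySem.List.pySetD ret s (PySem.List.pyGetD ret s 0 + 1)).length : Int) := by
      rw [pvLenSetD, hlen]; exact hguard
    rw [sub_eq_add_neg]
    rw [pvSumTakeSetD _ (e + 1) he0 hen (-1) (k + 1)]
    rw [pvSumTakeSetD ret s hs0 hsn 1 (k + 1)]
    rw [hkc]
    by_cases h1 : s ≤ (k : Int) <;> by_cases h2 : (k : Int) ≤ e
    · rw [if_pos (by omega), if_neg (by omega), if_pos ⟨h1, h2⟩]; ring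
    · rw [if_pos (by omega), if_pos (by omega), if_neg (by simp [h1, h2])]; ring
    · rw [if_neg (by omega), if_neg (by omega), if_neg (by simp [h1, h2])]; ring
    · rw [if_neg (by omega), if_neg (by omega), if_neg (by simp [h1, h2])]; ring
  · rename_i hguard
    rw [pvSumTakeSetD ret s hs0 hsn 1 (k + 1)]
    rw [hkc]
    have hke : (k : Int) ≤ e := by omega
    by_cases h1 : s ≤ (k : Int)
    · rw [if_pos (by omega), if_pos ⟨h1, hke⟩]
    · rw [if_neg (by omega), if_neg (by simp [h1])]

-- effect of B's inner painting loop: +1 at every index of [lo, hi)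
theorem pvPaint_length (t : Nat) (lo : Int) (ret : List Int) :
    ((PySem.List.pyRange lo (lo + (t : Int)) 1).foldl pvPaintStep ret).length = ret.length := by
  induction t generalizing ret with
  | zero => rw [show lo + ((0:Nat):Int) = lo by push_cast; ring, PySem.List.pyRange_one_eq_nil (by omega)]; rfl
  | succ t ih =>
    rw [show lo + ((t + 1 : Nat) : Int) = (lo + (t : Int)) + 1 by push_cast; ring]
    rw [PySem.List.pyRange_one_succ_right (by omega), List.foldl_append]
    simp only [List.foldl_cons, List.foldl_nil, pvPaintStep, pvLenSetD, ih]

theorem pvPaint_getD (t : Nat) (lo : Int) (h0 : 0 ≤ lo) (ret : List Int)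
    (hhi : lo + (t : Int) ≤ (ret.length : Int)) (k : Nat) (hk : k < ret.length) :
    ((PySem.List.pyRange lo (lo + (t : Int)) 1).foldl pvPaintStep ret).getD k 0
      = ret.getD k 0 + (if lo ≤ (k : Int) ∧ (k : Int) < lo + (t : Int) then 1 else 0) := by
  induction t generalizing ret with
  | zero =>
    rw [show lo + ((0:Nat):Int) = lo by push_cast; ring, PySem.List.pyRange_one_eq_nil (by omega)]
    simp only [List.foldl_nil]
    rw [if_neg (by omega)]; ring
  | succ t ih =>
    rw [show lo + ((t + 1 : Nat) : Int) = (lo + (t : Int)) + 1 by push_cast; ring]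
    rw [PySem.List.pyRange_one_succ_right (by omega), List.foldl_append]
    simp only [List.foldl_cons, List.foldl_nil]
    set F := (PySem.List.pyRange lo (lo + (t : Int)) 1).foldl pvPaintStep ret with hF
    have hFlen : F.length = ret.length := pvPaint_length t lo ret
    have hp0 : (0 : Int) ≤ lo + (t : Int) := by omega
    have hpn : lo + (t : Int) < (F.length : Int) := by rw [hFlen]; push_cast at hhi ⊢; omega
    show (pvPaintStep F (lo + (t:Int))).getD k 0 = _
    simp only [pvPaintStep]
    rw [pvGetDSetD F (lo + (t : Int)) hp0 hpn _ k]
    have hIH := ih ret (by push_cast at hhi ⊢; omega) hk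
    by_cases hkp : (k : Int) = lo + (t : Int)
    · rw [if_pos hkp]
      rw [PySem.List.pyGetD_of_nonneg F _ hp0]
      have htn : (lo + (t : Int)).toNat < ret.length := by omega
      have hteq : (lo + (t : Int)).toNat = k := by omega
      rw [hteq, hIH]
      rw [if_neg (by omega), if_pos (by omega)]
      ring
    · rw [if_neg hkp, hIH]
      by_cases hc : lo ≤ (k : Int) ∧ (k : Int) < lo + (t : Int)
      · rw [if_pos hc, if_pos (by omega)]
      · rw [if_neg hc, if_neg (by omega)]

theorem pvPaint_length' (lo hi : Int) (ret : List Int) :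
    ((PySem.List.pyRange lo hi 1).foldl pvPaintStep ret).length = ret.length := by
  by_cases h : hi ≤ lo
  · rw [PySem.List.pyRange_one_eq_nil h]; rfl
  · rw [show hi = lo + ((hi - lo).toNat : Int) by omega]
    exact pvPaint_length _ lo ret

theorem pvPaint_getD' (lo hi : Int) (h0 : 0 ≤ lo) (ret : List Int)
    (hhi : hi ≤ (ret.length : Int)) (k : Nat) (hk : k < ret.length) :
    ((PySem.List.pyRange lo hi 1).foldl pvPaintStep ret).getD k 0
      = ret.getD k 0 + (if lo ≤ (k : Int) ∧ (k : Int) < hi then 1 else 0) := by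
  by_cases h : hi ≤ lo
  · rw [PySem.List.pyRange_one_eq_nil h]
    simp only [List.foldl_nil]
    rw [if_neg (by omega)]; ring
  · rw [show hi = lo + ((hi - lo).toNat : Int) by omega] at hhi ⊢
    exact pvPaint_getD _ lo h0 ret hhi k hk

theorem pvStepB_length (a ret : List Int) (i : Int) : (pvStepB a ret i).length = ret.length := by
  simp only [pvStepB]
  exact pvPaint_length' _ _ ret

theorem pvStepB_getD (a ret : List Int) (hlen : ret.length = a.length) (m : Nat) (k : Nat) (hk : k < a.length) :
    (pvStepB a ret (m : Int)).getD k 0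
      = ret.getD k 0 +
        (if max 0 ((m : Int) - a.getD m 0) ≤ (k : Int) ∧ (k : Int) ≤ min ((a.length : Int) - 1) ((m : Int) + a.getD m 0) then 1 else 0) := by
  simp only [pvStepB, PySem.List.pyGetD_natCast]
  set s := max 0 ((m : Int) - a.getD m 0) with hs
  set e := min ((a.length : Int) - 1) ((m : Int) + a.getD m 0) with he
  rw [pvPaint_getD' s (e + 1) (le_max_left _ _) ret (by rw [hlen]; simp only [he]; omega) k (by omega)]
  congr 1
  by_cases h1 : s ≤ (k : Int) <;> by_cases h2 : (k : Int) ≤ e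
  · rw [if_pos ⟨h1, by omega⟩, if_pos ⟨h1, h2⟩]
  · rw [if_neg (by simp [h1]; omega), if_neg (by simp [h1, h2])]
  · rw [if_neg (by simp [h1]), if_neg (by simp [h1])]
  · rw [if_neg (by simp [h1]), if_neg (by simp [h1])]

-- length preservation of the folds
theorem pvFoldA_length (a : List Int) (l : List Int) (ret : List Int) :
    (l.foldl (pvStepA a) ret).length = ret.length := by
  induction l generalizing ret with
  | nil => rfl
  | cons x xs ih => simp only [List.foldl_cons]; rw [ih, pvStepA_length]

theorem pvFoldB_length (a : List Int) (l : List Int) (ret : List Int) :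
    (l.foldl (pvStepB a) ret).length = ret.length := by
  induction l generalizing ret with
  | nil => rfl
  | cons x xs ih => simp only [List.foldl_cons]; rw [ih, pvStepB_length]

theorem pvFoldPrefix_length (l : List Int) (ret : List Int) :
    (l.foldl pvPrefixStep ret).length = ret.length := by
  induction l generalizing ret with
  | nil => rfl
  | cons x xs ih => simp only [List.foldl_cons]; rw [ih]; simp [pvPrefixStep]

-- A's prefix-sum pass turns the difference array into its running sums
theorem pvPrefix_getD (ret : List Int) (m : Nat) (hm1 : 1 ≤ m) (hmn : m ≤ ret.length) :
    ∀ (k : Nat), k < ret.length →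
    ((PySem.List.pyRange 1 (m : Int) 1).foldl pvPrefixStep ret).getD k 0
      = if k < m then (ret.take (k + 1)).sum else ret.getD k 0 := by
  induction m, hm1 using Nat.le_induction with
  | base =>
    intro k hk
    rw [show ((1:Nat):Int) = 1 by rfl, PySem.List.pyRange_one_eq_nil (by omega)]
    simp only [List.foldl_nil]
    by_cases h : k < 1
    · have hk0 : k = 0 := by omega
      subst hk0
      rw [if_pos h]
      rw [List.sum_take_succ ret 0 hk]
      simp [List.getD_eq_getElem?_getD, List.getElem?_eq_getElem hk]
    · rw [if_neg h]
  | succ m hm1 ih =>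
    intro k hk
    have hmn' : m ≤ ret.length := by omega
    rw [show ((m + 1 : Nat) : Int) = (m : Int) + 1 by push_cast; ring]
    rw [PySem.List.pyRange_one_succ_right (by omega), List.foldl_append]
    simp only [List.foldl_cons, List.foldl_nil]
    set F := (PySem.List.pyRange 1 (m : Int) 1).foldl pvPrefixStep ret with hF
    have hFlen : F.length = ret.length := pvFoldPrefix_length _ ret
    have hmlt : m < ret.length := by omega
    have hIH := ih hmn' k hk
    simp only [pvPrefixStep]
    have hp0 : (0:Int) ≤ (m : Int) := by omega
    have hpn : (m : Int) < (F.length : Int) := by rw [hFlen]; omega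
    rw [pvGetDSetD F (m : Int) hp0 hpn _ k]
    have hvm : PySem.List.pyGetD F (m : Int) 0 = ret.getD m 0 := by
      rw [PySem.List.pyGetD_natCast]
      rw [ih hmn' m hmlt, if_neg (by omega)]
    have hvm1 : PySem.List.pyGetD F ((m : Int) - 1) 0 = (ret.take m).sum := by
      rw [show (m : Int) - 1 = ((m - 1 : Nat) : Int) by omega, PySem.List.pyGetD_natCast]
      rw [ih hmn' (m - 1) (by omega), if_pos (by omega), show m - 1 + 1 = m by omega]
    by_cases hkm : (k : Int) = (m : Int)
    · have hkeq : k = m := by omega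
      subst hkeq
      rw [if_pos rfl, if_pos (by omega), hvm, hvm1]
      rw [List.sum_take_succ ret k hk]
      rw [List.getD_eq_getElem?_getD, List.getElem?_eq_getElem hk]
      simp
      ring
    · rw [if_neg hkm, hIH]
      by_cases hc : k < m
      · rw [if_pos hc, if_pos (by omega)]
      · rw [if_neg hc, if_neg (by omega)]

-- the main invariant: after processing the first m lights, every prefix sum of A's
-- difference array equals the corresponding entry of B's painted array
theorem pvMainInv (a : List Int) (hpre : ∀ x ∈ a, 0 ≤ x) (m : Nat) (hm : m ≤ a.length) :
    ∀ k : Nat, k < a.length →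
      (((PySem.List.pyRange 0 (m : Int) 1).foldl (pvStepA a) (List.replicate a.length 0)).take (k + 1)).sum
        = ((PySem.List.pyRange 0 (m : Int) 1).foldl (pvStepB a) (List.replicate a.length 0)).getD k 0 := by
  induction m with
  | zero =>
    intro k hk
    rw [show ((0:Nat):Int) = 0 by rfl, PySem.List.pyRange_one_eq_nil (by omega)]
    simp only [List.foldl_nil]
    rw [List.take_replicate, List.getD_eq_getElem?_getD]
    simp
  | succ m ih =>
    intro k hk
    have hm' : m ≤ a.length := by omega
    have hmlt : m < a.length := by omega
    rw [show ((m + 1 : Nat) : Int) = (m : Int) + 1 by push_cast; ring]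
    rw [PySem.List.pyRange_one_succ_right (by omega)]
    simp only [List.foldl_append, List.foldl_cons, List.foldl_nil]
    set A := (PySem.List.pyRange 0 (m : Int) 1).foldl (pvStepA a) (List.replicate a.length 0) with hA
    set B := (PySem.List.pyRange 0 (m : Int) 1).foldl (pvStepB a) (List.replicate a.length 0) with hB
    have hAlen : A.length = a.length := by rw [hA, pvFoldA_length]; simp
    have hBlen : B.length = a.length := by rw [hB, pvFoldB_length]; simp
    have hai : 0 ≤ a.getD m 0 := by
      have : a.getD m 0 = a[m] := by
        rw [List.getD_eq_getElem?_getD, List.getElem?_eq_getElem hmlt]; rfl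
      rw [this]
      exact hpre _ (List.getElem_mem hmlt)
    rw [pvStepA_sumTake a A hAlen m hmlt hai k hk]
    rw [pvStepB_getD a B hBlen m k hk]
    rw [ih hm' k hk]

-- ===== VERDICT (by name: the statement is the Claim_ definition above) =====
theorem count_num_light_spec : Claim_equal_count_num_light := by
  intro a _hdom hpre
  unfold Spec_count_num_light
  simp only [count_num_light, count_num_light_alt]
  set A := (PySem.List.pyRange 0 (a.length : Int) 1).foldl (pvStepA a) (List.replicate a.length 0) with hA
  set B := (PySem.List.pyRange 0 (a.length : Int) 1).foldl (pvStepB a) (List.replicate a.length 0) with hB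
  have hAlen : A.length = a.length := by rw [hA, pvFoldA_length]; simp
  have hBlen : B.length = a.length := by rw [hB, pvFoldB_length]; simp
  apply List.ext_getElem
  · rw [pvFoldPrefix_length, hAlen, hBlen]
  · intro k hk1 hk2
    have hk : k < a.length := by rw [← hBlen]; exact hk2
    rcases Nat.eq_zero_or_pos a.length with hn0 | hn1
    · omega
    have hgd : ∀ (l : List Int) (hkl : k < l.length), l[k] = l.getD k 0 := by
      intro l hkl
      rw [List.getD_eq_getElem?_getD, List.getElem?_eq_getElem hkl]; rfl
    rw [hgd _ hk1, hgd _ hk2]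
    rw [pvPrefix_getD A a.length hn1 (by omega) k (by omega)]
    rw [if_pos hk]
    exact pvMainInv a hpre a.length (le_refl _) k hk
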